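-- pv_equiv track=rewrite | github.com/pc5401/my_BOJ | 백준/Gold/1451. 직사각형으로 나누기/직사각형으로 나누기.py | solve
-- ===== SOURCE A (Python) =====
-- def solve(N, M, A):
--     ps = [[0]*(M+1) for _ in range(N+1)]
--     for i in range(1, N+1):
--         row = ps[i]
--         prow = ps[i-1]
--         ai = A[i-1]
--         s = 0
--         for j in range(1, M+1):
--             s += ai[j-1]
--             row[j] = prow[j] + s
--
--     def rect(x1, y1, x2, y2):
--         return ps[x2][y2] - ps[x1-1][y2] - ps[x2][y1-1] + ps[x1-1][y1-1]
--
--     ans = 0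
--
--     for c1 in range(1, M-1):
--         for c2 in range(c1+1, M):
--             s1 = rect(1, 1, N, c1)
--             s2 = rect(1, c1+1, N, c2)
--             s3 = rect(1, c2+1, N, M)
--             v = s1 * s2 * s3
--             if v > ans:
--                 ans = v
--
--     for r1 in range(1, N-1):
--         for r2 in range(r1+1, N):
--             s1 = rect(1, 1, r1, M)
--             s2 = rect(r1+1, 1, r2, M)
--             s3 = rect(r2+1, 1, N, M)
--             v = s1 * s2 * s3
--             if v > ans:
--                 ans = v
--
--     for c in range(1, M):
--         for r in range(1, N):
--             s1 = rect(1, 1, N, c)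
--             s2 = rect(1, c+1, r, M)
--             s3 = rect(r+1, c+1, N, M)
--             v = s1 * s2 * s3
--             if v > ans:
--                 ans = v
--
--             s1 = rect(1, 1, r, c)
--             s2 = rect(r+1, 1, N, c)
--             s3 = rect(1, c+1, N, M)
--             v = s1 * s2 * s3
--             if v > ans:
--                 ans = v
--
--     for r in range(1, N):
--         for c in range(1, M):
--             s1 = rect(1, 1, r, M)
--             s2 = rect(r+1, 1, N, c)
--             s3 = rect(r+1, c+1, N, M)
--             v = s1 * s2 * s3
--             if v > ans:
--                 ans = v
--
--             s1 = rect(1, 1, r, c)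
--             s2 = rect(1, c+1, r, M)
--             s3 = rect(r+1, 1, N, M)
--             v = s1 * s2 * s3
--             if v > ans:
--                 ans = v
--
--     return ans
-- ===== SOURCE B (Python) =====
-- def solve(N, M, A):
--     if N < 1 or M < 1:
--         return 0          # degenerate grid: no three-rectangle partition exists
--     # 2D prefix table: P[i][j] = sum of A[x][y] for x < i, y < j (over the N x M grid)
--     def prefix(g, m):
--         P = [[0] * (m + 1)]
--         for row in g:
--             acc = [0]
--             for v in row[:m]:
--                 acc.append(acc[-1] + v)
--             P.append([p + a for p, a in zip(P[-1], acc)])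
--         return P
--
--     # candidates of the three "vertical-first" partition families of an n x m grid
--     def cands(n, m, P):
--         T = P[n][m]
--         out = []
--         for c1 in range(1, m - 1):          # three vertical strips
--             for c2 in range(c1 + 1, m):
--                 s1 = P[n][c1]
--                 s2 = P[n][c2] - P[n][c1]
--                 out.append(s1 * s2 * (T - s1 - s2))
--         for c in range(1, m):               # one vertical cut, one side split horizontally
--             for r in range(1, n):
--                 left = P[n][c]
--                 tr = P[r][m] - P[r][c]
--                 out.append(left * tr * (T - left - tr))
--                 tl = P[r][c]
--                 bl = P[n][c] - tl
--                 out.append(tl * bl * (T - P[n][c]))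
--         return out
--
--     G = [row[:M] for row in A[:N]]
--     GT = [list(col) for col in zip(*G)]     # transpose covers the horizontal-first families
--     return max([0] + cands(N, M, prefix(G, M)) + cands(M, N, prefix(GT, N)))
-- ===== Notes on version B (the rewrite author's own statement) =====
-- stated objective: simpler
-- what changed: A's six hand-written partition-family loops over the 2D prefix table are folded into one helper that scans only the vertical-first families (third piece = total minus the other two) and is applied to the grid and to its transpose, with an explicit 0 for degenerate dimensions where no partition exists.
import Mathlib
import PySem

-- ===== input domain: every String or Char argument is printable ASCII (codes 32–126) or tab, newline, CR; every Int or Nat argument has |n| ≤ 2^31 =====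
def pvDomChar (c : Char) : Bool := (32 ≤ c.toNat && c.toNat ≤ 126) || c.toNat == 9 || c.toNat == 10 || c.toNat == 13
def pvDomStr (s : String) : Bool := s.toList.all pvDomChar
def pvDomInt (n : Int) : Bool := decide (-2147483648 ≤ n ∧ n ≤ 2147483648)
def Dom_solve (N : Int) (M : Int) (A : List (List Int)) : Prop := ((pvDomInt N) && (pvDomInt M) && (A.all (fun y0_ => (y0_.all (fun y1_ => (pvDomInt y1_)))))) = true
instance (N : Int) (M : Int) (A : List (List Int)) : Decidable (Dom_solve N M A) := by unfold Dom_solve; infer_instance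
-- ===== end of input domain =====

-- B restructures A's six hand-written partition-family loops into one helper that scans only the
-- vertical-first families and is applied to the grid and to its transpose (simpler decomposition).

-- shared indexing helper: xs[i] with Python semantics (in range under Pre_)
def pidx (xs : List Int) (i : Int) : Int := PySem.List.pyGetD xs i 0
def pidx2 (ps : List (List Int)) (i j : Int) : Int := pidx (PySem.List.pyGetD ps i []) j

-- ===== PORT A =====
-- inner loop "for j in range(1, M+1): s += ai[j-1]; row[j] = prow[j] + s" (fuel = number of steps left)
def rowGoA (prow ai : List Int) (j s : Int) : Nat → List Int
  | 0 => []
  | f+1 =>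
    let s' := s + pidx ai (j-1)
    (pidx prow j + s') :: rowGoA prow ai (j+1) s' f

-- outer loop "for i in range(1, N+1)" building the rows of ps (row 0 stays the zero row)
def psGoA (A : List (List Int)) (M : Nat) (i : Int) (prow : List Int) : Nat → List (List Int)
  | 0 => []
  | f+1 =>
    let row := 0 :: rowGoA prow (PySem.List.pyGetD A (i-1) []) 1 0 M
    row :: psGoA A M (i+1) row f

def psA (N M : Int) (A : List (List Int)) : List (List Int) :=
  let z := List.replicate (M+1).toNat 0
  z :: psGoA A M.toNat 1 z N.toNat

def rectA (ps : List (List Int)) (x1 y1 x2 y2 : Int) : Int :=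
  pidx2 ps x2 y2 - pidx2 ps (x1-1) y2 - pidx2 ps x2 (y1-1) + pidx2 ps (x1-1) (y1-1)

def solve (N : Int) (M : Int) (A : List (List Int)) : Int :=
  let ps := psA N M A
  let a1 := (PySem.List.pyRange 1 (M-1) 1).foldl (fun ans c1 =>
    (PySem.List.pyRange (c1+1) M 1).foldl (fun ans c2 =>
      let s1 := rectA ps 1 1 N c1
      let s2 := rectA ps 1 (c1+1) N c2
      let s3 := rectA ps 1 (c2+1) N M
      let v := s1*s2*s3
      if v > ans then v else ans) ans) 0
  let a2 := (PySem.List.pyRange 1 (N-1) 1).foldl (fun ans r1 =>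
    (PySem.List.pyRange (r1+1) N 1).foldl (fun ans r2 =>
      let s1 := rectA ps 1 1 r1 M
      let s2 := rectA ps (r1+1) 1 r2 M
      let s3 := rectA ps (r2+1) 1 N M
      let v := s1*s2*s3
      if v > ans then v else ans) ans) a1
  let a3 := (PySem.List.pyRange 1 M 1).foldl (fun ans c =>
    (PySem.List.pyRange 1 N 1).foldl (fun ans r =>
      let v1 := rectA ps 1 1 N c * rectA ps 1 (c+1) r M * rectA ps (r+1) (c+1) N M
      let ans := if v1 > ans then v1 else ans
      let v2 := rectA ps 1 1 r c * rectA ps (r+1) 1 N c * rectA ps 1 (c+1) N M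
      if v2 > ans then v2 else ans) ans) a2
  (PySem.List.pyRange 1 N 1).foldl (fun ans r =>
    (PySem.List.pyRange 1 M 1).foldl (fun ans c =>
      let v1 := rectA ps 1 1 r M * rectA ps (r+1) 1 N c * rectA ps (r+1) (c+1) N M
      let ans := if v1 > ans then v1 else ans
      let v2 := rectA ps 1 1 r c * rectA ps 1 (c+1) r M * rectA ps (r+1) 1 N M
      if v2 > ans then v2 else ans) ans) a3

-- ===== PORT B =====
-- "acc = [0]; for v in row[:m]: acc.append(acc[-1] + v)"
def accB (row : List Int) (m : Int) : List Int :=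
  (PySem.List.slice row none (some m)).foldl (fun acc v => acc ++ [pidx acc (-1) + v]) [0]

-- "P = [[0]*(m+1)]; for row in g: P.append([p+a for p,a in zip(P[-1], acc)])"
def prefixB (g : List (List Int)) (m : Int) : List (List Int) :=
  g.foldl (fun P row =>
    P ++ [((PySem.List.pyGetD P (-1) []).zip (accB row m)).map (fun pa => pa.1 + pa.2)])
    [List.replicate (m+1).toNat 0]

def candsB (n m : Int) (P : List (List Int)) : List Int :=
  let T := pidx2 P n m
  let out1 := (PySem.List.pyRange 1 (m-1) 1).foldl (fun out c1 =>
    (PySem.List.pyRange (c1+1) m 1).foldl (fun out c2 =>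
      let s1 := pidx2 P n c1
      let s2 := pidx2 P n c2 - pidx2 P n c1
      out ++ [s1 * s2 * (T - s1 - s2)]) out) []
  (PySem.List.pyRange 1 m 1).foldl (fun out c =>
    (PySem.List.pyRange 1 n 1).foldl (fun out r =>
      let left := pidx2 P n c
      let tr := pidx2 P r m - pidx2 P r c
      let tl := pidx2 P r c
      let bl := pidx2 P n c - tl
      out ++ [left * tr * (T - left - tr), tl * bl * (T - pidx2 P n c)]) out) out1

-- "zip(*g)": exact when all rows of g have equal length, which Pre_ guarantees for the trimmed grid
def transpB (g : List (List Int)) : List (List Int) :=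
  match g with
  | [] => []
  | r0 :: _ => (List.range r0.length).map (fun j => g.map (fun row => row.getD j 0))

def solve_alt (N : Int) (M : Int) (A : List (List Int)) : Int :=
  if N < 1 ∨ M < 1 then 0 else    -- degenerate grid: no three-rectangle partition exists
  let G := (PySem.List.slice A none (some N)).map (fun row => PySem.List.slice row none (some M))
  let GT := transpB G
  (PySem.List.max? (0 :: (candsB N M (prefixB G M) ++ candsB M N (prefixB GT N))) (fun x => x)).getD 0

-- ===== PRECONDITION & SPEC =====
-- Pre_ excludes exactly the inputs on which A raises IndexError: N or M exceeding the grid's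
-- actual shape, or negative dimensions large enough that A's empty prefix table gets indexed.
def Pre_solve (N : Int) (M : Int) (A : List (List Int)) : Prop :=
  (1 ≤ N ∧ 1 ≤ M ∧ N ≤ (A.length : Int) ∧ ∀ row ∈ A.take N.toNat, M ≤ (row.length : Int))
  ∨ (N = 0 ∧ 0 ≤ M)
  ∨ (N < 0 ∧ 0 ≤ M ∧ M ≤ 2)
  ∨ (M < 0 ∧ N ≤ 2 ∧ (N ≤ 0 ∨ N ≤ (A.length : Int)))
  ∨ (M = 0 ∧ 1 ≤ N ∧ N ≤ (A.length : Int))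
instance (N : Int) (M : Int) (A : List (List Int)) : Decidable (Pre_solve N M A) := by
  unfold Pre_solve; infer_instance

def pvWitness_solve : Int × Int × List (List Int) := (2, 2, [[1, 2], [3, 4]])

def Spec_solve (N : Int) (M : Int) (A : List (List Int)) (out : Int) : Prop := out = solve_alt N M A
instance (N : Int) (M : Int) (A : List (List Int)) (out : Int) : Decidable (Spec_solve N M A out) := by unfold Spec_solve; infer_instance

-- ===== CLAIM (what is proved, stated in full; the proofs are below) =====
def Claim_equal_solve : Prop := ∀ (N : Int) (M : Int) (A : List (List Int)), Dom_solve N M A → Pre_solve N M A → Spec_solve N M A (solve N M A)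

-- ===== LEMMAS AND PROOFS =====
-- ===== proof-side definitions =====
def SSn (A : List (List Int)) (r c : Nat) : Int :=
  ∑ i ∈ Finset.range r, ∑ j ∈ Finset.range c, (A.getD i []).getD j 0

def SSf (A : List (List Int)) (r c : Int) : Int := SSn A r.toNat c.toNat

theorem SSn_zero_left (A : List (List Int)) (c : Nat) : SSn A 0 c = 0 := by simp [SSn]
theorem SSn_zero_right (A : List (List Int)) (r : Nat) : SSn A r 0 = 0 := by simp [SSn]
theorem SSn_succ_row (A : List (List Int)) (i c : Nat) :
    SSn A (i+1) c = SSn A i c + ∑ j ∈ Finset.range c, (A.getD i []).getD j 0 := by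
  simp [SSn, Finset.sum_range_succ]

-- rowGoA produces the j0..j0+f-1 entries of a prefix row
theorem rowGoA_eq (prow ai : List Int) :
    ∀ (f : Nat) (j0 s : Int), rowGoA prow ai j0 s f =
      (List.range f).map (fun (t : Nat) => pidx prow (j0 + t) + (s + ∑ k ∈ Finset.range (t+1), pidx ai (j0 - 1 + k))) := by
  intro f
  induction f with
  | zero => intro j0 s; rfl
  | succ f ih =>
    intro j0 s
    rw [List.range_succ_eq_map, List.map_cons]
    simp only [rowGoA, ih, List.map_map]
    refine congrArg₂ _ ?_ ?_
    · simp
    · refine List.map_congr_left fun t _ => ?_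
      simp only [Function.comp]
      push_cast
      have h1 : j0 + 1 + (t : Int) = j0 + (t + 1) := by ring
      have h2 : ∑ k ∈ Finset.range (t+1+1), pidx ai (j0 - 1 + k) =
          pidx ai (j0 - 1) + ∑ k ∈ Finset.range (t+1), pidx ai (j0 + 1 - 1 + k) := by
        rw [Finset.sum_range_succ' (fun k => pidx ai (j0 - 1 + (k:Nat)))]
        push_cast
        rw [add_comm]
        refine congrArg₂ _ (by norm_num) (Finset.sum_congr rfl fun k _ => by norm_num)
      rw [h1, h2]
      ring

-- the rows of A's prefix table
def rowF (A : List (List Int)) (M : Int) : Nat → List Int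
  | 0 => List.replicate (M+1).toNat 0
  | i+1 => 0 :: rowGoA (rowF A M i) (A.getD i []) 1 0 M.toNat

theorem psGoA_eq (A : List (List Int)) (M : Int) :
    ∀ (f : Nat) (i0 : Nat), psGoA A M.toNat ((i0 : Int) + 1) (rowF A M i0) f =
      (List.range f).map (fun t => rowF A M (i0 + t + 1)) := by
  intro f
  induction f with
  | zero => intro i0; rfl
  | succ f ih =>
    intro i0
    rw [List.range_succ_eq_map, List.map_cons]
    simp only [psGoA]
    have hrow : (0 : Int) :: rowGoA (rowF A M i0) (PySem.List.pyGetD A ((i0:Int) + 1 - 1) []) 1 0 M.toNat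
        = rowF A M (i0 + 1) := by
      have : ((i0:Int) + 1 - 1) = ((i0 : Nat) : Int) := by ring
      rw [this, PySem.List.pyGetD_natCast]
      rfl
    rw [hrow]
    refine congrArg₂ _ rfl ?_
    have : ((i0:Int) + 1) + 1 = (((i0+1 : Nat)) : Int) + 1 := by push_cast; ring
    rw [this, ih (i0+1)]
    simp only [List.map_map]
    refine List.map_congr_left fun t _ => ?_
    simp [Function.comp]
    ring_nf

theorem psA_getD (N M : Int) (A : List (List Int)) (i : Nat) (hi : i ≤ N.toNat) :
    (psA N M A).getD i [] = rowF A M i := by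
  unfold psA
  have h0 : ((0:Nat):Int) + 1 = 1 := by norm_num
  have := psGoA_eq A M N.toNat 0
  simp only [Nat.cast_zero, zero_add] at this
  rw [show rowF A M 0 = List.replicate (M+1).toNat 0 from rfl] at this
  show (List.replicate (M+1).toNat 0 :: psGoA A M.toNat 1 (List.replicate (M+1).toNat 0) N.toNat).getD i [] = rowF A M i
  cases i with
  | zero => rfl
  | succ t =>
    rw [List.getD_cons_succ, this]
    have ht : t < N.toNat := by omega
    rw [List.getD_eq_getElem?_getD]
    simp [ht]

theorem rowF_getD (A : List (List Int)) (M : Int) :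
    ∀ (i : Nat) (j : Nat), j ≤ M.toNat → (rowF A M i).getD j 0 = SSn A i j := by
  intro i
  induction i with
  | zero =>
    intro j hj
    rw [SSn_zero_left]
    simp only [rowF]
    rcases Nat.lt_or_ge j (M+1).toNat with h | h
    · rw [List.getD_eq_getElem?_getD]; simp [h]
    · rw [List.getD_eq_getElem?_getD]
      rw [List.getElem?_eq_none (by simpa using h)]
      rfl
  | succ i ih =>
    intro j hj
    cases j with
    | zero => rw [SSn_zero_right]; rfl
    | succ t =>
      simp only [rowF, List.getD_cons_succ]
      rw [rowGoA_eq]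
      have ht : t < M.toNat := by omega
      rw [List.getD_eq_getElem?_getD]
      rw [List.getElem?_map, List.getElem?_range ht]
      simp only [Option.map_some, Option.getD_some]
      have h1 : pidx (rowF A M i) (1 + (t:Int)) = SSn A i (t+1) := by
        have : (1 + (t:Int)) = ((t+1 : Nat) : Int) := by push_cast; ring
        rw [this]
        show PySem.List.pyGetD (rowF A M i) ((t+1 : Nat) : Int) 0 = _
        rw [PySem.List.pyGetD_natCast]
        exact ih (t+1) hj
      rw [h1, SSn_succ_row]
      refine congrArg₂ _ rfl ?_
      rw [zero_add]
      refine Finset.sum_congr rfl fun k _ => ?_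
      show PySem.List.pyGetD (A.getD i []) (1 - 1 + (k:Int)) 0 = _
      have : (1 - 1 + (k:Int)) = ((k : Nat) : Int) := by push_cast; ring
      rw [this, PySem.List.pyGetD_natCast]

theorem pidx2_psA (N M : Int) (A : List (List Int)) (i j : Int)
    (h0i : 0 ≤ i) (hiN : i ≤ N) (h0j : 0 ≤ j) (hjM : j ≤ M) :
    pidx2 (psA N M A) i j = SSf A i j := by
  have hi : i = ((i.toNat : Nat) : Int) := by omega
  have hj : j = ((j.toNat : Nat) : Int) := by omega
  rw [SSf]
  unfold pidx2 pidx
  rw [hi, hj, PySem.List.pyGetD_natCast, PySem.List.pyGetD_natCast]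
  rw [psA_getD N M A i.toNat (by omega)]
  exact rowF_getD A M i.toNat j.toNat (by omega)

-- running-sum loop of B
theorem accGo_eq (l : List Int) :
    ∀ (pre : List Int) (x : Int),
      l.foldl (fun acc v => acc ++ [pidx acc (-1) + v]) (pre ++ [x]) =
        pre ++ [x] ++ (List.range l.length).map (fun (t : Nat) => x + ∑ k ∈ Finset.range (t+1), l.getD k 0) := by
  induction l with
  | nil => intro pre x; simp
  | cons v l ih =>
    intro pre x
    simp only [List.foldl_cons]
    have hlast : pidx (pre ++ [x]) (-1) = x := by
      unfold pidx
      exact PySem.List.pyGetD_neg_one_append_singleton pre x 0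
    rw [hlast]
    rw [show (pre ++ [x]) ++ [x + v] = (pre ++ [x]) ++ [x + v] from rfl, ih (pre ++ [x]) (x + v)]
    rw [List.length_cons, List.range_succ_eq_map, List.map_cons, List.map_map]
    simp only [List.append_assoc, List.cons_append, List.nil_append]
    refine congrArg₂ _ rfl (congrArg₂ _ rfl ?_)
    have h0 : x + ∑ k ∈ Finset.range (0+1), (v :: l).getD k 0 = x + v := by simp
    rw [h0]
    refine congrArg₂ _ rfl ?_
    refine List.map_congr_left fun t _ => ?_
    simp only [Function.comp]
    have : ∑ k ∈ Finset.range (t+1+1), (v :: l).getD k 0 = v + ∑ k ∈ Finset.range (t+1), l.getD k 0 := by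
      rw [Finset.sum_range_succ' (fun k => (v :: l).getD k 0)]
      simp [add_comm]
    rw [this]
    ring

theorem accB_eq (row : List Int) (m : Int) (h0 : 0 ≤ m) (hlen : m ≤ (row.length : Int)) :
    accB row m = (List.range (m.toNat+1)).map (fun (j : Nat) => ∑ k ∈ Finset.range j, row.getD k 0) := by
  unfold accB
  rw [PySem.List.slice_to row h0]
  have := accGo_eq (row.take m.toNat) [] 0
  simp only [List.nil_append] at this
  rw [this]
  rw [List.length_take_of_le (by omega)]
  rw [List.range_succ_eq_map, List.map_cons, List.map_map, List.singleton_append]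
  refine congrArg₂ _ (by rw [Finset.range_zero, Finset.sum_empty]) ?_
  refine List.map_congr_left fun t ht => ?_
  simp only [Function.comp]
  rw [List.mem_range] at ht
  rw [zero_add]
  refine Finset.sum_congr rfl fun k hk => ?_
  rw [Finset.mem_range] at hk
  rw [List.getD_eq_getElem?_getD, List.getD_eq_getElem?_getD, List.getElem?_take_of_lt (by omega)]

theorem map_range_succ {α : Type} (f : Nat → α) (n : Nat) :
    (List.range (n+1)).map f = (List.range n).map f ++ [f n] := by
  rw [List.range_succ, List.map_append, List.map_cons, List.map_nil]

theorem SSn_append_le (g : List (List Int)) (row : List Int) (i j : Nat) (hi : i ≤ g.length) :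
    SSn (g ++ [row]) i j = SSn g i j := by
  unfold SSn
  refine Finset.sum_congr rfl fun t ht => ?_
  rw [Finset.mem_range] at ht
  refine Finset.sum_congr rfl fun k _ => ?_
  rw [List.getD_eq_getElem?_getD (l := g ++ [row]), List.getElem?_append_left (by omega),
    ← List.getD_eq_getElem?_getD]

theorem prefixB_eq (m : Int) (h0 : 0 ≤ m) (g : List (List Int)) :
    (∀ row ∈ g, m ≤ (row.length : Int)) →
      prefixB g m = (List.range (g.length+1)).map
        (fun (i : Nat) => (List.range (m.toNat+1)).map (fun (j : Nat) => SSn g i j)) := by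
  induction g using List.reverseRecOn with
  | nil =>
    intro _
    show [List.replicate (m+1).toNat 0] = _
    have : (m+1).toNat = m.toNat + 1 := by omega
    rw [this]
    simp [SSn_zero_left, List.replicate]
  | append_singleton g row ih =>
    intro hrows
    have hg : ∀ r ∈ g, m ≤ (r.length : Int) := fun r hr => hrows r (List.mem_append_left _ hr)
    have hrow : m ≤ (row.length : Int) := hrows row (List.mem_append_right _ (List.mem_singleton.mpr rfl))
    unfold prefixB
    rw [List.foldl_append]
    rw [show (g.foldl (fun P row =>
      P ++ [((PySem.List.pyGetD P (-1) []).zip (accB row m)).map (fun pa => pa.1 + pa.2)])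
      [List.replicate (m+1).toNat 0]) = prefixB g m from rfl, ih hg]
    simp only [List.foldl_cons, List.foldl_nil]
    have hlast : PySem.List.pyGetD ((List.range (g.length+1)).map
        (fun (i : Nat) => (List.range (m.toNat+1)).map (fun (j : Nat) => SSn g i j))) (-1) [] =
        (List.range (m.toNat+1)).map (fun (j : Nat) => SSn g g.length j) := by
      rw [map_range_succ (fun (i : Nat) => (List.range (m.toNat+1)).map (fun (j : Nat) => SSn g i j)) g.length]
      exact PySem.List.pyGetD_neg_one_append_singleton _ _ _
    rw [hlast, accB_eq row m h0 hrow, List.zip_map', List.map_map]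
    have hnew : (List.range (m.toNat+1)).map
        ((fun (pa : Int × Int) => pa.1 + pa.2) ∘ fun (j : Nat) => (SSn g g.length j, ∑ k ∈ Finset.range j, row.getD k 0)) =
        (List.range (m.toNat+1)).map (fun (j : Nat) => SSn (g ++ [row]) (g.length + 1) j) := by
      refine List.map_congr_left fun j _ => ?_
      simp only [Function.comp]
      rw [SSn_succ_row]
      rw [show (g ++ [row]).getD g.length [] = row by
        rw [List.getD_eq_getElem?_getD, List.getElem?_concat_length]; rfl]
      rw [SSn_append_le g row g.length j le_rfl]
    rw [hnew]
    have hlen : (g ++ [row]).length + 1 = (g.length + 1) + 1 := by simp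
    rw [hlen, map_range_succ (fun (i : Nat) => (List.range (m.toNat+1)).map
      (fun (j : Nat) => SSn (g ++ [row]) i j)) (g.length+1)]
    refine congrArg₂ _ ?_ rfl
    refine List.map_congr_left fun i hi => ?_
    rw [List.mem_range] at hi
    refine List.map_congr_left fun j _ => ?_
    rw [SSn_append_le g row i j (by omega)]

theorem pidx2_prefixB (g : List (List Int)) (m : Int) (h0 : 0 ≤ m)
    (hrows : ∀ row ∈ g, m ≤ (row.length : Int)) (i j : Int)
    (h0i : 0 ≤ i) (hig : i ≤ (g.length : Int)) (h0j : 0 ≤ j) (hjm : j ≤ m) :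
    pidx2 (prefixB g m) i j = SSn g i.toNat j.toNat := by
  have hi : i = ((i.toNat : Nat) : Int) := by omega
  have hj : j = ((j.toNat : Nat) : Int) := by omega
  unfold pidx2 pidx
  rw [hi, hj, PySem.List.pyGetD_natCast, PySem.List.pyGetD_natCast, prefixB_eq m h0 g hrows]
  rw [PySem.List.getD_map_range _ _ _ _ (by omega), PySem.List.getD_map_range _ _ _ _ (by omega)]
  simp only [Int.toNat_natCast]

-- ===== fold machinery =====
theorem if_gt_max (a v : Int) : (if v > a then v else a) = max a v := by
  rw [max_def]; split_ifs <;> omega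

theorem foldl_max_body {α : Type} (l : List α) (f : α → Int) (a : Int) :
    l.foldl (fun acc x => max acc (f x)) a = (l.map f).foldl max a :=
  by rw [List.foldl_map]

theorem foldl_flatMap_max {α : Type} (l : List α) (f : α → List Int) (init : Int) :
    l.foldl (fun a x => (f x).foldl max a) init = (l.flatMap f).foldl max init := by
  induction l generalizing init with
  | nil => rfl
  | cons x t ih => simp only [List.foldl_cons, List.flatMap_cons, List.foldl_append, ih]

theorem foldl_max_swap (l : List Int) : ∀ (a b : Int), l.foldl max (max a b) = max b (l.foldl max a) := by
  induction l with
  | nil => intro a b; exact max_comm a b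
  | cons x t ih =>
    intro a b
    simp only [List.foldl_cons]
    rw [show max (max a b) x = max (max a x) b by omega, ih (max a x) b]

theorem foldl_max_comm (l1 l2 : List Int) (a : Int) :
    l2.foldl max (l1.foldl max a) = l1.foldl max (l2.foldl max a) := by
  induction l1 generalizing a with
  | nil => rfl
  | cons x t ih =>
    simp only [List.foldl_cons]
    rw [foldl_max_swap t a x, max_comm x (t.foldl max a), foldl_max_swap l2 (t.foldl max a) x,
      ih a, ← foldl_max_swap t (l2.foldl max a) x]

-- ===== canonical candidate lists =====
def C1 (S : Int → Int → Int) (n m : Int) : List Int :=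
  (PySem.List.pyRange 1 (m-1) 1).flatMap (fun c1 => (PySem.List.pyRange (c1+1) m 1).map (fun c2 =>
    S n c1 * (S n c2 - S n c1) * (S n m - S n c1 - (S n c2 - S n c1))))

def C3 (S : Int → Int → Int) (n m : Int) : List Int :=
  (PySem.List.pyRange 1 m 1).flatMap (fun c => (PySem.List.pyRange 1 n 1).map (fun r =>
    max (S n c * (S r m - S r c) * (S n m - S n c - (S r m - S r c)))
        (S r c * (S n c - S r c) * (S n m - S n c))))

-- the pair-list form B's loop produces
def C3p (S : Int → Int → Int) (n m : Int) : List Int :=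
  (PySem.List.pyRange 1 m 1).flatMap (fun c => (PySem.List.pyRange 1 n 1).flatMap (fun r =>
    [S n c * (S r m - S r c) * (S n m - S n c - (S r m - S r c)),
     S r c * (S n c - S r c) * (S n m - S n c)]))

theorem candsB_eq (n m : Int) (P : List (List Int)) :
    candsB n m P = C1 (fun a b => pidx2 P a b) n m ++ C3p (fun a b => pidx2 P a b) n m := by
  unfold candsB C1 C3p
  simp only [PySem.List.foldl_append_singleton_eq_map, PySem.List.foldl_append_eq_flatMap]
  rw [List.nil_append]

theorem pidx2_psA_row0 (N M : Int) (A : List (List Int)) (j : Int) :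
    pidx2 (psA N M A) 0 j = 0 := by
  unfold psA pidx2
  rw [show ((0:Int) = ((0:Nat):Int)) from rfl, PySem.List.pyGetD_natCast]
  show pidx (List.replicate (M+1).toNat 0) j = 0
  unfold pidx
  by_cases h : PySem.Raise.InRange (List.replicate (M+1).toNat (0:Int)).length j
  · have := PySem.List.pyGetD_mem (List.replicate (M+1).toNat (0:Int)) 0 h
    exact List.eq_of_mem_replicate this
  · rw [PySem.List.pyGetD_of_none _ _ _ ((PySem.List.pyGet?_eq_none_iff _ _).mpr h)]

theorem pidx2_psA_col0 (N M : Int) (A : List (List Int)) (i : Int) :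
    pidx2 (psA N M A) i 0 = 0 := by
  have hrow : ∀ row ∈ psA N M A, row.getD 0 0 = 0 := by
    intro row hrow
    unfold psA at hrow
    rcases List.mem_cons.mp hrow with h | h
    · subst h
      cases hM : (M+1).toNat with
      | zero => rfl
      | succ k => simp [List.replicate]
    · have := psGoA_eq A M N.toNat 0
      simp only [Nat.cast_zero, zero_add] at this
      rw [show rowF A M 0 = List.replicate (M+1).toNat 0 from rfl] at this
      rw [this] at h
      obtain ⟨t, _, ht⟩ := List.mem_map.mp h
      rw [← ht]
      rfl
  unfold pidx2 pidx
  rw [PySem.List.pyGetD_zero]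
  by_cases h : PySem.Raise.InRange (psA N M A).length i
  · exact hrow _ (PySem.List.pyGetD_mem _ [] h)
  · rw [PySem.List.pyGetD_of_none _ _ _ ((PySem.List.pyGet?_eq_none_iff _ _).mpr h)]
    rfl

theorem solveA_canon (N M : Int) (A : List (List Int)) (hN : 1 ≤ N) (hM : 0 ≤ M) :
    solve N M A = (C1 (SSf A) N M ++ C1 (fun a b => SSf A b a) M N ++ C3 (SSf A) N M
      ++ C3 (fun a b => SSf A b a) M N).foldl max 0 := by
  have hps : ∀ i j : Int, 0 ≤ i → i ≤ N → 0 ≤ j → j ≤ M →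
      pidx2 (psA N M A) i j = SSf A i j := fun i j h1 h2 h3 h4 => pidx2_psA N M A i j h1 h2 h3 h4
  unfold solve
  simp only [rectA, if_gt_max]
  norm_num [pidx2_psA_row0, pidx2_psA_col0]
  simp only [foldl_max_body, foldl_flatMap_max]
  refine congrArg₂ (List.foldl max) (congrArg₂ (List.foldl max) (congrArg₂ (List.foldl max)
    (congrArg₂ (List.foldl max) rfl ?_) ?_) ?_) ?_
  · -- family 1 = C1 (SSf A) N M
    unfold C1
    refine List.flatMap_congr fun c1 hc1 => ?_
    rw [PySem.List.mem_pyRange_one] at hc1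
    refine List.map_congr_left fun c2 hc2 => ?_
    rw [PySem.List.mem_pyRange_one] at hc2
    rw [hps N c1 (by omega) le_rfl (by omega) (by omega),
      hps N c2 (by omega) le_rfl (by omega) (by omega),
      hps N M (by omega) le_rfl hM le_rfl]
    ring
  · -- family 2 = C1 (flip) M N
    unfold C1
    refine List.flatMap_congr fun r1 hr1 => ?_
    rw [PySem.List.mem_pyRange_one] at hr1
    refine List.map_congr_left fun r2 hr2 => ?_
    rw [PySem.List.mem_pyRange_one] at hr2
    rw [hps r1 M (by omega) (by omega) hM le_rfl,
      hps r2 M (by omega) (by omega) hM le_rfl,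
      hps N M (by omega) le_rfl hM le_rfl]
    ring
  · -- family 3 = C3 (SSf A) N M
    unfold C3
    refine List.flatMap_congr fun c hc => ?_
    rw [PySem.List.mem_pyRange_one] at hc
    refine List.map_congr_left fun r hr => ?_
    rw [PySem.List.mem_pyRange_one] at hr
    rw [hps N c (by omega) le_rfl (by omega) (by omega),
      hps r M (by omega) (by omega) hM le_rfl,
      hps r c (by omega) (by omega) (by omega) (by omega),
      hps N M (by omega) le_rfl hM le_rfl]
    exact congrArg₂ max (by ring) (by ring)
  · -- family 4 = C3 (flip) M N
    unfold C3
    refine List.flatMap_congr fun r hr => ?_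
    rw [PySem.List.mem_pyRange_one] at hr
    refine List.map_congr_left fun c hc => ?_
    rw [PySem.List.mem_pyRange_one] at hc
    rw [hps r M (by omega) (by omega) hM le_rfl,
      hps N c (by omega) le_rfl (by omega) (by omega),
      hps r c (by omega) (by omega) (by omega) (by omega),
      hps N M (by omega) le_rfl hM le_rfl]
    exact congrArg₂ max (by ring) (by ring)

theorem foldl_max_pairs {α : Type} (l : List α) (f g : α → Int) :
    ∀ a : Int, (l.flatMap (fun x => [f x, g x])).foldl max a
      = (l.map (fun x => max (f x) (g x))).foldl max a := by
  induction l with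
  | nil => intro a; rfl
  | cons x t ih =>
    intro a
    simp only [List.flatMap_cons, List.map_cons, List.foldl_cons, List.foldl_append]
    rw [show max (max a (f x)) (g x) = max a (max (f x) (g x)) by omega]
    exact ih _

theorem foldl_max_C3p (S : Int → Int → Int) (n m : Int) (a : Int) :
    (C3p S n m).foldl max a = (C3 S n m).foldl max a := by
  unfold C3p C3
  rw [← foldl_flatMap_max, ← foldl_flatMap_max]
  have hfun : (fun (a : Int) (x : Int) => ((PySem.List.pyRange 1 n 1).flatMap (fun r =>
      [S n x * (S r m - S r x) * (S n m - S n x - (S r m - S r x)),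
       S r x * (S n x - S r x) * (S n m - S n x)])).foldl max a)
      = (fun (a : Int) (x : Int) => ((PySem.List.pyRange 1 n 1).map (fun r =>
        max (S n x * (S r m - S r x) * (S n m - S n x - (S r m - S r x)))
            (S r x * (S n x - S r x) * (S n m - S n x)))).foldl max a) := by
    funext a x
    rw [foldl_max_pairs]
  rw [hfun]

theorem SSn_take (A : List (List Int)) (n m : Nat) (i j : Nat) (hi : i ≤ n) (hn : n ≤ A.length)
    (hj : j ≤ m) : SSn ((A.take n).map (fun row => row.take m)) i j = SSn A i j := by
  unfold SSn
  refine Finset.sum_congr rfl fun t ht => ?_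
  rw [Finset.mem_range] at ht
  refine Finset.sum_congr rfl fun k hk => ?_
  rw [Finset.mem_range] at hk
  have h1 : ((A.take n).map (fun row => row.take m)).getD t [] = (A.getD t []).take m := by
    rw [List.getD_eq_getElem?_getD, List.getElem?_map, List.getElem?_take_of_lt (by omega),
      List.getElem?_eq_getElem (show t < A.length by omega)]
    simp only [Option.map_some, Option.getD_some]
    rw [List.getD_eq_getElem A [] (show t < A.length by omega)]
  rw [h1, List.getD_eq_getElem?_getD (l := (A.getD t []).take m),
    List.getElem?_take_of_lt (by omega), ← List.getD_eq_getElem?_getD]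

theorem SSn_transpB (r0 : List Int) (rest : List (List Int)) (r c : Nat)
    (hr : r ≤ r0.length) (hc : c ≤ (r0 :: rest).length) :
    SSn (transpB (r0 :: rest)) r c = SSn (r0 :: rest) c r := by
  show SSn ((List.range r0.length).map (fun j => (r0 :: rest).map (fun row => row.getD j 0))) r c = _
  unfold SSn
  rw [Finset.sum_comm]
  refine Finset.sum_congr rfl fun k hk => ?_
  rw [Finset.mem_range] at hk
  refine Finset.sum_congr rfl fun t ht => ?_
  rw [Finset.mem_range] at ht
  rw [PySem.List.getD_map_range _ _ _ _ (by omega)]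
  rw [List.getD_eq_getElem?_getD (l := ((r0 :: rest)).map (fun row => row.getD t 0)), List.getElem?_map]
  rw [List.getElem?_eq_getElem (show k < (r0 :: rest).length by omega)]
  simp only [Option.map_some, Option.getD_some]
  rw [List.getD_eq_getElem (r0 :: rest) [] (show k < (r0 :: rest).length by omega)]

theorem solveB_canon (N M : Int) (A : List (List Int)) (hN : 1 ≤ N) (hM1 : 1 ≤ M)
    (hlen : N ≤ (A.length : Int)) (hrows : ∀ row ∈ A.take N.toNat, M ≤ (row.length : Int)) :
    solve_alt N M A = ((C1 (SSf A) N M ++ C3p (SSf A) N M)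
      ++ (C1 (fun a b => SSf A b a) M N ++ C3p (fun a b => SSf A b a) M N)).foldl max 0 := by
  have hM : (0:Int) ≤ M := by omega
  have hG : (PySem.List.slice A none (some N)).map (fun row => PySem.List.slice row none (some M))
      = (A.take N.toNat).map (fun row => row.take M.toNat) := by
    rw [PySem.List.slice_to A (by omega)]
    exact List.map_congr_left fun row _ => PySem.List.slice_to row hM
  set Gt := (A.take N.toNat).map (fun row => row.take M.toNat) with hGt
  have hrowsEq : ∀ row ∈ Gt, row.length = M.toNat := by
    intro row hrow
    obtain ⟨row0, hrow0, hr0⟩ := List.mem_map.mp hrow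
    have := hrows row0 hrow0
    rw [← hr0, List.length_take]
    omega
  have hGtlen : Gt.length = N.toNat := by
    rw [hGt, List.length_map, List.length_take]
    omega
  have hSG : ∀ i j : Int, 0 ≤ i → i ≤ N → 0 ≤ j → j ≤ M →
      pidx2 (prefixB Gt M) i j = SSf A i j := by
    intro i j h1 h2 h3 h4
    rw [pidx2_prefixB Gt M hM (fun row hrow => by rw [hrowsEq row hrow]; omega) i j h1
      (by rw [hGtlen]; omega) h3 h4]
    rw [SSf, hGt, SSn_take A N.toNat M.toNat i.toNat j.toNat (by omega) (by omega) (by omega)]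
  obtain ⟨g0, grest, hcons⟩ : ∃ g0 grest, Gt = g0 :: grest := by
    cases hG' : Gt with
    | nil => rw [hG'] at hGtlen; simp at hGtlen; omega
    | cons a b => exact ⟨a, b, rfl⟩
  have hg0len : g0.length = M.toNat := hrowsEq g0 (by rw [hcons]; exact List.mem_cons_self)
  have hGTshape : transpB Gt = (List.range g0.length).map (fun j => Gt.map (fun row => row.getD j 0)) := by
    rw [hcons]; rfl
  have hGTlen : (transpB Gt).length = M.toNat := by
    rw [hGTshape, List.length_map, List.length_range, hg0len]
  have hGTrows : ∀ row ∈ transpB Gt, N ≤ (row.length : Int) := by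
    intro row hrow
    rw [hGTshape] at hrow
    obtain ⟨t, _, ht⟩ := List.mem_map.mp hrow
    rw [← ht, List.length_map, hGtlen]
    omega
  have hST : ∀ i j : Int, 0 ≤ i → i ≤ M → 0 ≤ j → j ≤ N →
      pidx2 (prefixB (transpB Gt) N) i j = SSf A j i := by
    intro i j h1 h2 h3 h4
    rw [pidx2_prefixB (transpB Gt) N (by omega) hGTrows i j h1 (by rw [hGTlen]; omega) h3 h4]
    rw [hcons, SSn_transpB g0 grest i.toNat j.toNat (by omega)
      (by rw [show (g0 :: grest).length = Gt.length by rw [hcons], hGtlen]; omega)]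
    rw [show (g0 :: grest) = Gt from hcons.symm, SSf, hGt,
      SSn_take A N.toNat M.toNat j.toNat i.toNat (by omega) (by omega) (by omega)]
  simp only [solve_alt]
  rw [if_neg (show ¬(N < 1 ∨ M < 1) by omega)]
  rw [hG, candsB_eq, candsB_eq, PySem.List.max?_id_cons, Option.getD_some]
  have e1 : C1 (fun a b => pidx2 (prefixB Gt M) a b) N M = C1 (SSf A) N M := by
    simp only [C1]
    refine List.flatMap_congr fun c1 hc1 => ?_
    rw [PySem.List.mem_pyRange_one] at hc1
    refine List.map_congr_left fun c2 hc2 => ?_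
    rw [PySem.List.mem_pyRange_one] at hc2
    rw [hSG N c1 (by omega) le_rfl (by omega) (by omega),
      hSG N c2 (by omega) le_rfl (by omega) (by omega),
      hSG N M (by omega) le_rfl hM le_rfl]
  have e2 : C3p (fun a b => pidx2 (prefixB Gt M) a b) N M = C3p (SSf A) N M := by
    simp only [C3p]
    refine List.flatMap_congr fun c hc => ?_
    rw [PySem.List.mem_pyRange_one] at hc
    refine List.flatMap_congr fun r hr => ?_
    rw [PySem.List.mem_pyRange_one] at hr
    rw [hSG N c (by omega) le_rfl (by omega) (by omega),
      hSG r M (by omega) (by omega) hM le_rfl,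
      hSG r c (by omega) (by omega) (by omega) (by omega),
      hSG N M (by omega) le_rfl hM le_rfl]
  have e3 : C1 (fun a b => pidx2 (prefixB (transpB Gt) N) a b) M N
      = C1 (fun a b => SSf A b a) M N := by
    simp only [C1]
    refine List.flatMap_congr fun c1 hc1 => ?_
    rw [PySem.List.mem_pyRange_one] at hc1
    refine List.map_congr_left fun c2 hc2 => ?_
    rw [PySem.List.mem_pyRange_one] at hc2
    rw [hST M c1 (by omega) le_rfl (by omega) (by omega),
      hST M c2 (by omega) le_rfl (by omega) (by omega),
      hST M N (by omega) le_rfl (by omega) le_rfl]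
  have e4 : C3p (fun a b => pidx2 (prefixB (transpB Gt) N) a b) M N
      = C3p (fun a b => SSf A b a) M N := by
    simp only [C3p]
    refine List.flatMap_congr fun c hc => ?_
    rw [PySem.List.mem_pyRange_one] at hc
    refine List.flatMap_congr fun r hr => ?_
    rw [PySem.List.mem_pyRange_one] at hr
    rw [hST M c (by omega) le_rfl (by omega) (by omega),
      hST r N (by omega) (by omega) (by omega) le_rfl,
      hST r c (by omega) (by omega) (by omega) (by omega),
      hST M N (by omega) le_rfl (by omega) le_rfl]
  rw [e1, e2, e3, e4, List.append_assoc]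

theorem solve_eq_alt (N M : Int) (A : List (List Int)) (hN : 1 ≤ N) (hM1 : 1 ≤ M)
    (hlen : N ≤ (A.length : Int)) (hrows : ∀ row ∈ A.take N.toNat, M ≤ (row.length : Int)) :
    solve N M A = solve_alt N M A := by
  rw [solveA_canon N M A hN (by omega), solveB_canon N M A hN hM1 hlen hrows]
  simp only [List.foldl_append]
  rw [foldl_max_C3p, foldl_max_C3p]
  rw [foldl_max_comm (C1 (fun a b => SSf A b a) M N) (C3 (SSf A) N M)
    (List.foldl max 0 (C1 (SSf A) N M))]

-- ===== degenerate dimensions: both sides return 0 =====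
theorem foldl_max0 (l : List Int) : ∀ a : Int, 0 ≤ a → l.foldl (fun x (_ : Int) => max x 0) a = a := by
  induction l with
  | nil => intro a _; rfl
  | cons x t ih =>
    intro a ha
    simp only [List.foldl_cons]
    rw [show max a 0 = a by omega]
    exact ih a ha

theorem foldl_foldl_max0 (L : List Int) (R : Int → List Int) :
    ∀ a : Int, 0 ≤ a → L.foldl (fun x c => (R c).foldl (fun y (_ : Int) => max y 0) x) a = a := by
  induction L with
  | nil => intro a _; rfl
  | cons x t ih =>
    intro a ha
    simp only [List.foldl_cons]
    rw [foldl_max0 (R x) a ha]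
    exact ih a ha

theorem solve_deg_small (N M : Int) (A : List (List Int)) (hM2 : M ≤ 2) (hN2 : N ≤ 2)
    (hsmall : N ≤ 1 ∨ M ≤ 1) : solve N M A = 0 := by
  unfold solve
  rw [PySem.List.pyRange_one_eq_nil (show M - 1 ≤ 1 by omega),
    PySem.List.pyRange_one_eq_nil (show N - 1 ≤ 1 by omega)]
  rcases hsmall with h | h
  · rw [PySem.List.pyRange_one_eq_nil (show N ≤ 1 from h)]
    simp [PySem.List.foldl_ignore]
  · rw [PySem.List.pyRange_one_eq_nil (show M ≤ 1 from h)]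
    simp [PySem.List.foldl_ignore]

theorem solve_deg_rowzero (M : Int) (A : List (List Int)) : solve 0 M A = 0 := by
  unfold solve
  norm_num [rectA, pidx2_psA_row0, if_gt_max, PySem.List.pyRange_one_eq_nil,
    PySem.List.foldl_ignore]
  exact foldl_foldl_max0 _ _ 0 le_rfl

theorem solve_deg_colzero (N : Int) (A : List (List Int)) : solve N 0 A = 0 := by
  unfold solve
  norm_num [rectA, pidx2_psA_col0, if_gt_max, PySem.List.pyRange_one_eq_nil,
    PySem.List.foldl_ignore]
  exact foldl_foldl_max0 _ _ 0 le_rfl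

-- ===== VERDICT (by name: the statement is the Claim_ definition above) =====
theorem solve_spec : Claim_equal_solve := by
  intro N M A hDom hPre
  show solve N M A = solve_alt N M A
  have halt0 : ∀ h : N < 1 ∨ M < 1, solve_alt N M A = 0 := fun h => by
    unfold solve_alt
    rw [if_pos h]
  rcases hPre with ⟨hN, hM1, hlen, hrows⟩ | ⟨hN0, hM⟩ | ⟨hNneg, hM, hM2⟩ | ⟨hMneg, hN2, _⟩ |
    ⟨hM0, hN, hlen⟩
  · exact solve_eq_alt N M A hN hM1 hlen hrows
  · rw [halt0 (by omega), hN0, solve_deg_rowzero]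
  · rw [halt0 (by omega), solve_deg_small N M A (by omega) (by omega) (by omega)]
  · rw [halt0 (by omega), solve_deg_small N M A (by omega) (by omega) (by omega)]
  · rw [halt0 (by omega), hM0, solve_deg_colzero]
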